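-- pv_equiv track=rewrite | github.com/asmit404/GFG_Solutions | Smaller Sum.py | smallerSum
-- ===== SOURCE A (Python) =====
-- from typing import List
--
-- def smallerSum(n: int, arr: List[int]) -> List[int]:
--     dict = {}
--     x = arr.copy()
--     x.sort()
--     s = 0
--     ans = []
--     for i in range(n):
--         if x[i] not in dict:
--             dict[x[i]] = s
--         s += x[i]
--     for i in arr:
--         ans.append(dict[i])
--     return ans
-- ===== SOURCE B (Python) =====
-- from typing import List
--
-- def smallerSum(n: int, arr: List[int]) -> List[int]:
--     vals = {arr[i] for i in range(n)}
--     sums = {v: sum(w for w in arr if w < v) for v in vals}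
--     return [sums[v] for v in arr]
-- ===== Notes on version B (the rewrite author's own statement) =====
-- stated objective: alternative
-- what changed: Replaced the sort + running-prefix-sum dictionary with a per-distinct-value full scan: a dict comprehension mapping each distinct value v to the sum of all elements strictly below v, then per-element lookups; no sorting, no prefix sums.
-- outside the precondition, e.g. on smallerSum(2, [2, 2, 1]): A returns [1, 1, 0], B raises KeyError
import Mathlib
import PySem

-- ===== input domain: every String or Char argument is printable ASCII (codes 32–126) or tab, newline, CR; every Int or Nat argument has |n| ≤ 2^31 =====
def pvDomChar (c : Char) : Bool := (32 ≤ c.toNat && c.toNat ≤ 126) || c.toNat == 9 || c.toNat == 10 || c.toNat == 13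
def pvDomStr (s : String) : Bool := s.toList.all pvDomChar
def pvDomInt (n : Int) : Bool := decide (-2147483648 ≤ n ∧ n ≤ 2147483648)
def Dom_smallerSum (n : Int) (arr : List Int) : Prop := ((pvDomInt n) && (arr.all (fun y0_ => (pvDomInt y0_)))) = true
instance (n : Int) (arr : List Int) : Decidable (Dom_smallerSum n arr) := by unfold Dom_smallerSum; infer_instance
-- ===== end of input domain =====

-- B replaces A's sort + running-prefix-sum dictionary by a per-distinct-value full
-- scan (sum of the strictly smaller elements); objective: alternative, no speed claim.

-- ===== PORT A =====
-- one loop step of A's first for-loop: state (dict, running sum s), next sorted element xi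
def ssStep (p : PySem.Dict Int Int × Int) (xi : Int) : PySem.Dict Int Int × Int :=
  ((if p.1.contains xi then p.1 else p.1.insert xi p.2), p.2 + xi)

-- 'x[i]' and 'dict[i]' raise in Python where pyGetD/getD take the default; Pre_ excludes exactly those inputs.
def smallerSum (n : Int) (arr : List Int) : List Int :=
  let x := PySem.List.sorted arr (fun v => v) false
  let st := (PySem.List.pyRange 0 n 1).foldl
      (fun p i => ssStep p (PySem.List.pyGetD x i 0)) (PySem.Dict.empty, 0)
  arr.map (fun i => st.1.getD i 0)

-- ===== PORT B =====
-- 'arr[i]' and 'sums[v]' raise in Python where pyGetD/getD take the default; Pre_ excludes those inputs.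
-- sums is a dict built by iterating the set vals and only looked up afterwards, so the result is set-iteration-order independent.
def smallerSum_alt (n : Int) (arr : List Int) : List Int :=
  let vals : PySem.Set Int :=
    PySem.Set.ofList ((PySem.List.pyRange 0 n 1).map (fun i => PySem.List.pyGetD arr i 0))
  let sums : PySem.Dict Int Int := vals.foldl (fun d v =>
    d.insert v (arr.foldl (fun s w => if w < v then s + w else s) 0)) PySem.Dict.empty
  arr.map (fun v => sums.getD v 0)

-- ===== PRECONDITION & SPEC =====
-- Pre_ is exactly the inputs on which BOTH programs return: A raises IndexError for n > len(arr)
-- and KeyError when some value of arr is missing from the first n sorted elements; B raises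
-- IndexError for n > len(arr) and KeyError when some value of arr is missing from arr[:n]
-- (n ≠ len(arr) is a malformed size argument; only duplicate-heavy corners of it return at all).
def Pre_smallerSum (n : Int) (arr : List Int) : Prop :=
  n ≤ arr.length
    ∧ (∀ v ∈ arr, v ∈ (PySem.List.sorted arr (fun v => v) false).take n.toNat)
    ∧ (∀ v ∈ arr, v ∈ arr.take n.toNat)
instance (n : Int) (arr : List Int) : Decidable (Pre_smallerSum n arr) := by
  unfold Pre_smallerSum; infer_instance

def pvWitness_smallerSum : Int × List Int := (3, [5, 1, 5])

def Spec_smallerSum (n : Int) (arr : List Int) (out : List Int) : Prop := out = smallerSum_alt n arr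
instance (n : Int) (arr : List Int) (out : List Int) : Decidable (Spec_smallerSum n arr out) := by unfold Spec_smallerSum; infer_instance

-- ===== CLAIM (what is proved, stated in full; the proofs are below) =====
def Claim_equal_smallerSum : Prop := ∀ (n : Int) (arr : List Int), Dom_smallerSum n arr → Pre_smallerSum n arr → Spec_smallerSum n arr (smallerSum n arr)

-- ===== LEMMAS AND PROOFS =====

-- A's range(n) loop reads x[0..n-1], i.e. folds over x.take n
theorem ss_fold_range_take (x : List Int) (m : Nat) (hm : m ≤ x.length)
    (init : PySem.Dict Int Int × Int) :
    (PySem.List.pyRange 0 (m : Int) 1).foldl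
        (fun p i => ssStep p (PySem.List.pyGetD x i 0)) init
      = (x.take m).foldl ssStep init := by
  induction m with
  | zero => simp [PySem.List.pyRange]
  | succ k ih =>
    have hk : k < x.length := by omega
    have hsplit : (PySem.List.pyRange 0 ((k : Int) + 1) 1)
        = PySem.List.pyRange 0 (k : Int) 1 ++ [(k : Int)] := by
      exact PySem.List.pyRange_one_succ_right (by positivity)
    have htake : x.take (k + 1) = x.take k ++ [x[k]] := by
      rw [List.take_add_one, List.getElem?_eq_getElem hk]; rfl
    push_cast
    rw [hsplit, List.foldl_append, ih (by omega), htake, List.foldl_append]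
    simp [PySem.List.pyGetD_natCast, List.getElem?_eq_getElem hk]

-- an existing dict entry survives the whole loop (insert happens only on fresh keys)
theorem ss_fold_preserve (l : List Int) (d : PySem.Dict Int Int) (s v c : Int)
    (h : d.get? v = some c) : ((l.foldl ssStep (d, s)).1).get? v = some c := by
  induction l generalizing d s with
  | nil => simpa using h
  | cons a t ih =>
    simp only [List.foldl_cons]
    apply ih
    by_cases hc : d.contains a
    · simpa [ssStep, hc] using h
    · have hne : v ≠ a := by
        intro he; subst he
        rw [PySem.Dict.contains_eq_isSome_get?, h] at hc; simp at hc
      simpa [ssStep, hc, PySem.Dict.get?_insert_of_ne d _ hne] using h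

-- main loop invariant: on an ascending list, the recorded value for v is
-- s plus the sum of the elements strictly below v
theorem ss_fold_get (l : List Int) (d : PySem.Dict Int Int) (s v : Int)
    (hp : l.Pairwise (· ≤ ·)) (hv : v ∈ l) (hd : d.contains v = false) :
    ((l.foldl ssStep (d, s)).1).get? v
      = some (s + (l.filter (fun w => decide (w < v))).sum) := by
  induction l generalizing d s with
  | nil => simp at hv
  | cons a t ih =>
    rcases List.pairwise_cons.mp hp with ⟨ha, hpt⟩
    by_cases hva : v = a
    · subst hva
      have hfil : t.filter (fun w => decide (w < v)) = [] := by
        rw [List.filter_eq_nil_iff]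
        intro b hb
        simpa using not_lt.mpr (ha b hb)
      simp only [List.foldl_cons, ssStep, hd, Bool.false_eq_true, if_false]
      rw [ss_fold_preserve t _ _ v s (PySem.Dict.get?_insert_self d v s)]
      simp [hfil]
    · have hvt : v ∈ t := by
        rcases List.mem_cons.mp hv with h | h
        · exact absurd h hva
        · exact h
      have hav : a < v := lt_of_le_of_ne (ha v hvt) (fun h => hva h.symm)
      simp only [List.foldl_cons, ssStep]
      have hd' : (if d.contains a then d else d.insert a s).contains v = false := by
        by_cases hc : d.contains a
        · simpa [hc] using hd
        · simp only [if_neg hc, PySem.Dict.contains_insert, hd]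
          simp [hva]
      rw [ih _ _ hpt hvt hd']
      simp [hav]
      ring

-- B's inner loop is s plus the filtered sum
theorem alt_inner (v : Int) (l : List Int) (s : Int) :
    l.foldl (fun s w => if w < v then s + w else s) s
      = s + (l.filter (fun w => decide (w < v))).sum := by
  induction l generalizing s with
  | nil => simp
  | cons a t ih =>
    by_cases h : a < v
    · simp [h, ih, add_assoc]
    · simp [h, ih]

-- B's range(n) set comprehension reads arr[0..n-1], i.e. collects arr.take n
theorem map_pyGetD_range_take (x : List Int) (m : Nat) (hm : m ≤ x.length) :
    (PySem.List.pyRange 0 (m : Int) 1).map (fun i => PySem.List.pyGetD x i 0) = x.take m := by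
  induction m with
  | zero => simp [PySem.List.pyRange]
  | succ k ih =>
    have hk : k < x.length := by omega
    have hsplit : (PySem.List.pyRange 0 ((k : Int) + 1) 1)
        = PySem.List.pyRange 0 (k : Int) 1 ++ [(k : Int)] := by
      exact PySem.List.pyRange_one_succ_right (by positivity)
    have htake : x.take (k + 1) = x.take k ++ [x[k]] := by
      rw [List.take_add_one, List.getElem?_eq_getElem hk]; rfl
    push_cast
    rw [hsplit, List.map_append, ih (by omega), htake]
    simp [PySem.List.pyGetD_natCast, List.getElem?_eq_getElem hk]

-- ===== VERDICT (by name: the statement is the Claim_ definition above) =====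
theorem smallerSum_spec : Claim_equal_smallerSum := by
  intro n arr _ hpre
  rcases hpre with ⟨hn, hallx, halla⟩
  unfold Spec_smallerSum smallerSum smallerSum_alt
  by_cases hn0 : 0 ≤ n
  · set x := PySem.List.sorted arr (fun v => v) false with hx
    have hlen : x.length = arr.length := PySem.List.length_sorted arr _ _
    have hperm : x.Perm arr := PySem.List.sorted_perm arr _ _
    have hpw : x.Pairwise (· ≤ ·) := by
      simpa using PySem.List.sorted_pairwise arr (fun v => v)
    have hcast : ((n.toNat : Int)) = n := Int.toNat_of_nonneg hn0
    have hmx : n.toNat ≤ x.length := by omega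
    have hma : n.toNat ≤ arr.length := by omega
    -- A's first loop folds over x.take n
    have hfold : (PySem.List.pyRange 0 n 1).foldl
        (fun p i => ssStep p (PySem.List.pyGetD x i 0)) (PySem.Dict.empty, 0)
        = (x.take n.toNat).foldl ssStep (PySem.Dict.empty, 0) := by
      rw [← hcast]
      exact ss_fold_range_take x n.toNat hmx _
    -- B's set comprehension collects arr.take n
    have hvals : (PySem.List.pyRange 0 n 1).map (fun i => PySem.List.pyGetD arr i 0)
        = arr.take n.toNat := by
      rw [← hcast]
      exact map_pyGetD_range_take arr n.toNat hma
    -- B's dict maps each distinct value of arr.take n to its filtered sum over all of arr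
    have houter : ∀ v ∈ arr,
        ((PySem.Set.ofList (arr.take n.toNat)).foldl (fun d v =>
            d.insert v (arr.foldl (fun s w => if w < v then s + w else s) 0))
            (PySem.Dict.empty : PySem.Dict Int Int)).getD v 0
          = (arr.filter (fun w => decide (w < v))).sum := by
      intro v hv
      have hvs : v ∈ PySem.Set.ofList (arr.take n.toNat) :=
        (PySem.Set.mem_ofList _ v).mpr (halla v hv)
      have hitems := PySem.Dict.items_foldl_insert_fresh
        (l := PySem.Set.ofList (arr.take n.toNat)) (k := fun a => a)
        (v := fun a => arr.foldl (fun s w => if w < a then s + w else s) 0)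
        (d := PySem.Dict.empty)
        (by intro a _; exact PySem.Dict.contains_empty a)
        (by simp)
      have hkeys : ((PySem.Set.ofList (arr.take n.toNat)).foldl (fun d v =>
          d.insert v (arr.foldl (fun s w => if w < v then s + w else s) 0))
          (PySem.Dict.empty : PySem.Dict Int Int)).keys.Nodup := by
        apply PySem.Dict.nodup_keys_foldl_insert
        exact PySem.Dict.nodup_keys_empty
      have hmem : (v, arr.foldl (fun s w => if w < v then s + w else s) 0)
          ∈ ((PySem.Set.ofList (arr.take n.toNat)).foldl (fun d v =>
              d.insert v (arr.foldl (fun s w => if w < v then s + w else s) 0))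
              (PySem.Dict.empty : PySem.Dict Int Int)).items := by
        rw [hitems]
        simp only [List.mem_append, List.mem_map]
        right
        exact ⟨v, hvs, rfl⟩
      rw [PySem.Dict.getD_of_mem_items _ hmem hkeys, alt_inner]
      ring
    simp only [hfold, hvals]
    apply List.map_congr_left
    intro v hv
    rw [houter v hv]
    -- A's recorded value for v: filtered sum over x.take n = over x = over arr
    have hvt : v ∈ x.take n.toNat := hallx v hv
    have hpt : (x.take n.toNat).Pairwise (· ≤ ·) := hpw.sublist (List.take_sublist _ _)
    have hget := ss_fold_get (x.take n.toNat) PySem.Dict.empty 0 v hpt hvt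
      (PySem.Dict.contains_empty v)
    rw [PySem.Dict.getD_eq_get?_getD, hget]
    have hxsplit : x = x.take n.toNat ++ x.drop n.toNat := (List.take_append_drop _ _).symm
    have hdropnil : (x.drop n.toNat).filter (fun w => decide (w < v)) = [] := by
      rw [List.filter_eq_nil_iff]
      intro b hb
      have hle : v ≤ b := (List.pairwise_append.mp (hxsplit ▸ hpw)).2.2 v hvt b hb
      simpa using not_lt.mpr hle
    have hsum1 : ((x.take n.toNat).filter (fun w => decide (w < v))).sum
        = (x.filter (fun w => decide (w < v))).sum := by
      conv_rhs => rw [hxsplit]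
      rw [List.filter_append, hdropnil, List.append_nil]
    have hsum2 : (x.filter (fun w => decide (w < v))).sum
        = (arr.filter (fun w => decide (w < v))).sum := (hperm.filter _).sum_eq
    simp [hsum1, hsum2]
  · -- n < 0: arr.take 0 = [], so Pre_ forces arr = []; both sides are []
    have harr : arr = [] := by
      cases arr with
      | nil => rfl
      | cons a t =>
        have := halla a (by simp)
        rw [show n.toNat = 0 by omega] at this
        simp at this
    subst harr
    rw [PySem.List.pyRange_one_eq_nil (by omega)]
    simp
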